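-- pv_equiv track=rewrite | github.com/mariojfduarte/Helbreath-3.82 | convert_put_to_draw.py | find_call_args
-- ===== SOURCE A (Python) =====
-- def find_call_args(content, start_pos):
--     """Find arguments of a function call starting at the opening paren.
--     Returns (args_list, end_pos) where end_pos is after the closing paren."""
--     if content[start_pos] != '(':
--         return None, start_pos
--
--     depth = 1
--     pos = start_pos + 1
--     args = []
--     current_arg_start = pos
--
--     while pos < len(content) and depth > 0:
--         ch = content[pos]
--         if ch == '(':
--             depth += 1
--         elif ch == ')':
--             depth -= 1
--             if depth == 0:
--                 # End of call - capture last arg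
--                 arg = content[current_arg_start:pos].strip()
--                 if arg:
--                     args.append(arg)
--         elif ch == ',' and depth == 1:
--             # Argument separator at our level
--             arg = content[current_arg_start:pos].strip()
--             args.append(arg)
--             current_arg_start = pos + 1
--         pos += 1
--
--     return args, pos
-- ===== SOURCE B (Python) =====
-- def find_call_args(content, start_pos):
--     """Find arguments of a function call starting at the opening paren.
--     Returns (args_list, end_pos) where end_pos is after the closing paren."""
--     if content[start_pos] != '(':
--         return None, start_pos
--
--     # Pass 1: one depth-tracking scan that only records positions — the
--     # top-level comma positions and the matching close paren (if any).
--     n = len(content)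
--     commas = []
--     close = None
--     depth = 1
--     for pos in range(start_pos + 1, n):
--         ch = content[pos]
--         if ch == '(':
--             depth += 1
--         elif ch == ')':
--             depth -= 1
--             if depth == 0:
--                 close = pos
--                 break
--         elif ch == ',' and depth == 1:
--             commas.append(pos)
--
--     # Pass 2: assemble the argument slices between the recorded positions.
--     ends = commas if close is None else commas + [close]
--     starts = [start_pos + 1] + [p + 1 for p in commas]
--     args = [content[a:b].strip() for a, b in zip(starts, ends)]
--     if close is not None and args and args[-1] == '':
--         args.pop()
--     return args, (n if close is None else close + 1)
-- ===== Notes on version B (the rewrite author's own statement) =====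
-- stated objective: alternative
-- what changed: A interleaves scanning with building args (stripping and appending slices, and tracking current_arg_start, inside the depth loop); B first scans recording only positions (top-level commas and the matching close paren), then assembles the args declaratively by zipping adjacent boundary positions, slicing, stripping, and dropping a trailing empty argument.
-- outside the precondition, e.g. on find_call_args('(a)', 5): A raises IndexError, B raises IndexError
import Mathlib
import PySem

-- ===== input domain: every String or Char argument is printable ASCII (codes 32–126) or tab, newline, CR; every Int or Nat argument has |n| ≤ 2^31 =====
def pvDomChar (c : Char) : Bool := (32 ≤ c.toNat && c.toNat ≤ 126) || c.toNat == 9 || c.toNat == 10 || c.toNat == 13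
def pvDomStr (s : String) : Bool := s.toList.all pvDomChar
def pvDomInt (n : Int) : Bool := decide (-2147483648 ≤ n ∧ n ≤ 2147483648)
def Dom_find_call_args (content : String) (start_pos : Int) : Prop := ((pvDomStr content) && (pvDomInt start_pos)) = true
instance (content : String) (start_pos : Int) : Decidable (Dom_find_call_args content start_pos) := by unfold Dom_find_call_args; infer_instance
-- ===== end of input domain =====

-- B replaces A's interleaved scan-and-append loop by a position-only scan (top-level
-- commas + close paren) followed by a declarative slice/zip assembly; objective: alternative.

-- ===== PORT A =====
-- A's while loop: state (depth, pos, args, current_arg_start); fuel = n - pos, loop needs pos < n.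
def pvALoop (fuel : Nat) (content : String) (depth pos : Int) (args : List String)
    (current_arg_start : Int) : List String × Int :=
  match fuel with
  | 0 => (args, pos)
  | fuel + 1 =>
    if pos < PySem.Str.len content ∧ depth > 0 then
      match PySem.Str.pyGet? content pos with
      | none => (args, pos)  -- unreachable inside Pre_: pos is always in range
      | some ch =>
        if ch = '(' then
          pvALoop fuel content (depth + 1) (pos + 1) args current_arg_start
        else if ch = ')' then
          if depth - 1 = 0 then
            let arg := PySem.Str.strip (PySem.Str.slice content (some current_arg_start) (some pos))
            pvALoop fuel content (depth - 1) (pos + 1)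
              (if arg ≠ "" then args ++ [arg] else args) current_arg_start
          else
            pvALoop fuel content (depth - 1) (pos + 1) args current_arg_start
        else if ch = ',' ∧ depth = 1 then
          pvALoop fuel content depth (pos + 1)
            (args ++ [PySem.Str.strip (PySem.Str.slice content (some current_arg_start) (some pos))])
            (pos + 1)
        else
          pvALoop fuel content depth (pos + 1) args current_arg_start
    else (args, pos)

def find_call_args (content : String) (start_pos : Int) : Option (List String) × Int :=
  match PySem.Str.pyGet? content start_pos with
  | none => (none, start_pos)  -- content[start_pos] raises IndexError: outside Pre_
  | some c =>
    if c ≠ '(' then (none, start_pos)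
    else
      let r := pvALoop (PySem.Str.len content - (start_pos + 1)).toNat content 1 (start_pos + 1)
        [] (start_pos + 1)
      (some r.1, r.2)

-- ===== PORT B =====
-- B pass 1: scan recording only positions — top-level commas, and the close paren if found.
def pvBScan (fuel : Nat) (content : String) (n depth pos : Int) (commas : List Int) :
    List Int × Option Int :=
  match fuel with
  | 0 => (commas, none)
  | fuel + 1 =>
    if pos < n then
      match PySem.Str.pyGet? content pos with
      | none => (commas, none)  -- unreachable inside Pre_
      | some ch =>
        if ch = '(' then pvBScan fuel content n (depth + 1) (pos + 1) commas
        else if ch = ')' then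
          if depth - 1 = 0 then (commas, some pos)
          else pvBScan fuel content n (depth - 1) (pos + 1) commas
        else if ch = ',' ∧ depth = 1 then pvBScan fuel content n depth (pos + 1) (commas ++ [pos])
        else pvBScan fuel content n depth (pos + 1) commas
    else (commas, none)

-- B pass 2: slice between the recorded positions, strip, drop a trailing empty arg.
def pvBArgs (content : String) (cas : Int) (commas : List Int) (close : Option Int) :
    List String :=
  let ends := match close with | none => commas | some c => commas ++ [c]
  let starts := cas :: commas.map (· + 1)
  let args := (starts.zip ends).map
    (fun ab => PySem.Str.strip (PySem.Str.slice content (some ab.1) (some ab.2)))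
  if close.isSome ∧ args ≠ [] ∧ args.getLast? = some "" then args.dropLast else args

def find_call_args_alt (content : String) (start_pos : Int) : Option (List String) × Int :=
  match PySem.Str.pyGet? content start_pos with
  | none => (none, start_pos)  -- content[start_pos] raises IndexError: outside Pre_
  | some c =>
    if c ≠ '(' then (none, start_pos)
    else
      let n := PySem.Str.len content
      let s := pvBScan (n - (start_pos + 1)).toNat content n 1 (start_pos + 1) []
      (some (pvBArgs content (start_pos + 1) s.1 s.2),
       match s.2 with | none => n | some c => c + 1)

-- ===== PRECONDITION & SPEC =====
-- Pre_ excludes exactly the inputs where content[start_pos] raises IndexError.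
def Pre_find_call_args (content : String) (start_pos : Int) : Prop :=
  PySem.Raise.InRange content.length start_pos
instance (content : String) (start_pos : Int) : Decidable (Pre_find_call_args content start_pos) := by
  unfold Pre_find_call_args; infer_instance

def pvWitness_find_call_args : String × Int := ("(a, b(c), )x", 0)

def Spec_find_call_args (content : String) (start_pos : Int) (out : Option (List String) × Int) :
    Prop := out = find_call_args_alt content start_pos
instance (content : String) (start_pos : Int) (out : Option (List String) × Int) :
    Decidable (Spec_find_call_args content start_pos out) := by
  unfold Spec_find_call_args; infer_instance

-- ===== CLAIM (what is proved, stated in full; the proofs are below) =====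
def Claim_equal_find_call_args : Prop := ∀ (content : String) (start_pos : Int),
  Dom_find_call_args content start_pos → Pre_find_call_args content start_pos →
  Spec_find_call_args content start_pos (find_call_args content start_pos)

-- ===== LEMMAS AND PROOFS =====

-- A's incremental assembly of args from the positions B records (proof-only helper).
def pvAsmA (content : String) (cas : Int) : List Int → Option Int → List String
  | p :: rest, close =>
    PySem.Str.strip (PySem.Str.slice content (some cas) (some p)) ::
      pvAsmA content (p + 1) rest close
  | [], some c =>
    let a := PySem.Str.strip (PySem.Str.slice content (some cas) (some c))
    if a ≠ "" then [a] else []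
  | [], none => []

theorem pvBScan_acc (fuel : Nat) (content : String) (n : Int) :
    ∀ depth pos commas, pvBScan fuel content n depth pos commas =
      (commas ++ (pvBScan fuel content n depth pos []).1,
       (pvBScan fuel content n depth pos []).2) := by
  induction fuel with
  | zero => intro depth pos commas; simp [pvBScan]
  | succ fuel ih =>
    intro depth pos commas
    by_cases h : pos < n
    · cases hg : PySem.Str.pyGet? content pos with
      | none => simp only [pvBScan, if_pos h]; rw [hg]; simp
      | some ch =>
        simp only [pvBScan, if_pos h]
        rw [hg]
        by_cases h1 : ch = '('
        · simp only [if_pos h1]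
          exact ih (depth + 1) (pos + 1) commas
        · simp only [if_neg h1]
          by_cases h2 : ch = ')'
          · simp only [if_pos h2]
            by_cases h3 : depth - 1 = 0
            · simp [if_pos h3]
            · simp only [if_neg h3]
              exact ih (depth - 1) (pos + 1) commas
          · simp only [if_neg h2]
            by_cases h4 : ch = ',' ∧ depth = 1
            · simp only [if_pos h4]
              rw [ih depth (pos + 1) (commas ++ [pos])]
              simp only [List.nil_append]
              rw [ih depth (pos + 1) [pos]]
              simp
            · simp only [if_neg h4]
              exact ih depth (pos + 1) commas
    · simp [pvBScan, h]

theorem pvLoop_eq (content : String) :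
    ∀ fuel : Nat, ∀ depth pos : Int, ∀ args : List String, ∀ cas : Int,
    0 < depth → pos ≤ PySem.Str.len content → -(content.length : Int) ≤ pos →
    (PySem.Str.len content - pos).toNat ≤ fuel →
    pvALoop fuel content depth pos args cas =
      (args ++ pvAsmA content cas (pvBScan fuel content (PySem.Str.len content) depth pos []).1
        (pvBScan fuel content (PySem.Str.len content) depth pos []).2,
       match (pvBScan fuel content (PySem.Str.len content) depth pos []).2 with
       | none => PySem.Str.len content
       | some c => c + 1) := by
  intro fuel
  induction fuel with
  | zero =>
    intro depth pos args cas hd hle hlo hf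
    have hpn : pos = PySem.Str.len content := by
      simp only [PySem.Str.len_eq] at hle hf ⊢; omega
    simp [pvALoop, pvBScan, pvAsmA, hpn]
  | succ fuel ih =>
    intro depth pos args cas hd hle hlo hf
    by_cases h : pos < PySem.Str.len content
    · have hg : ∃ ch, PySem.Str.pyGet? content pos = some ch := by
        have hne : PySem.Str.pyGet? content pos ≠ none := by
          simp only [PySem.Str.len_eq] at h
          simp only [ne_eq, PySem.Str.pyGet?, PySem.Chars.pyGet?_eq_listPyGet?,
            PySem.List.pyGet?_eq_none_iff, PySem.Raise.InRange, not_not]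
          have h0 : content.toList.length = content.length := String.length_toList
          omega
        cases hx : PySem.Str.pyGet? content pos with
        | none => exact absurd hx hne
        | some ch => exact ⟨ch, rfl⟩
      obtain ⟨ch, hch⟩ := hg
      have hf' : (PySem.Str.len content - (pos + 1)).toNat ≤ fuel := by
        simp only [PySem.Str.len_eq] at hf ⊢; omega
      have hle' : pos + 1 ≤ PySem.Str.len content := by
        simp only [PySem.Str.len_eq] at h ⊢; omega
      have hlo' : -(content.length : Int) ≤ pos + 1 := by omega
      simp only [pvALoop, pvBScan, if_pos h, if_pos (And.intro h hd)]
      rw [hch]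
      by_cases h1 : ch = '('
      · simp only [if_pos h1]
        exact ih (depth + 1) (pos + 1) args cas (by omega) hle' hlo' hf'
      · simp only [if_neg h1]
        by_cases h2 : ch = ')'
        · simp only [if_pos h2]
          by_cases h3 : depth - 1 = 0
          · simp only [if_pos h3]
            have hstop : ∀ f a, pvALoop f content (depth - 1) (pos + 1) a cas = (a, pos + 1) := by
              intro f a; cases f <;> simp [pvALoop, h3]
            rw [hstop]
            simp only [pvAsmA]
            by_cases he :
                PySem.Str.strip (PySem.Str.slice content (some cas) (some pos)) = ""
            · simp [he]
            · simp [he]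
          · simp only [if_neg h3]
            exact ih (depth - 1) (pos + 1) args cas (by omega) hle' hlo' hf'
        · simp only [if_neg h2]
          by_cases h4 : ch = ',' ∧ depth = 1
          · simp only [if_pos h4]
            simp only [List.nil_append]
            rw [pvBScan_acc fuel content (PySem.Str.len content) depth (pos + 1) [pos]]
            rw [ih depth (pos + 1)
              (args ++ [PySem.Str.strip (PySem.Str.slice content (some cas) (some pos))])
              (pos + 1) hd hle' hlo' hf']
            simp [pvAsmA]
          · simp only [if_neg h4]
            exact ih depth (pos + 1) args cas hd hle' hlo' hf'
    · have hpn : pos = PySem.Str.len content := by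
        simp only [PySem.Str.len_eq] at hle h ⊢; omega
      simp [pvALoop, pvBScan, pvAsmA, hpn]

-- For a found close, B's pre-pop zip list is never empty and its length matches ends.
theorem pvAsm_eq (content : String) :
    ∀ commas : List Int, ∀ close : Option Int, ∀ cas : Int,
    pvBArgs content cas commas close = pvAsmA content cas commas close := by
  intro commas
  induction commas with
  | nil =>
    intro close cas
    cases close with
    | none => simp [pvBArgs, pvAsmA]
    | some c =>
      simp only [pvBArgs, pvAsmA, List.map_nil, List.nil_append, List.zip_cons_cons,
        List.zip_nil_right, List.map_cons, List.map_nil]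
      by_cases he : PySem.Str.strip (PySem.Str.slice content (some cas) (some c)) = ""
      · simp [he]
      · simp [he]
  | cons p rest ih =>
    intro close cas
    have hrec := ih close (p + 1)
    simp only [pvBArgs] at hrec ⊢
    cases close with
    | none =>
      simp only [Option.isSome_none, Bool.false_eq_true, false_and, if_false] at hrec ⊢
      simp only [pvAsmA, ← hrec]
      simp [List.zip_cons_cons]
    | some c =>
      simp only [Option.isSome_some, true_and] at hrec ⊢
      -- the tail zip list is nonempty: ends' has rest.length + 1 entries, starts' has rest.length + 1
      have hlen : (((p + 1) :: rest.map (· + 1)).zip (rest ++ [c])).length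
          = rest.length + 1 := by
        simp [List.length_zip]
      set tail := (((p + 1) :: rest.map (· + 1)).zip (rest ++ [c])).map
        (fun ab => PySem.Str.strip (PySem.Str.slice content (some ab.1) (some ab.2))) with htail
      have htne : tail ≠ ([] : List String) := by
        intro hn
        have := congrArg List.length hn
        simp only [htail, List.length_map, hlen, List.length_nil] at this
        exact Nat.succ_ne_zero _ this
      simp only [pvAsmA, ← hrec]
      simp only [List.map_cons, List.cons_append, List.zip_cons_cons, List.map_cons, ← htail]
      have hlast : ∀ x : String, (x :: tail).getLast? = tail.getLast? := by
        intro x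
        match tail, htne with
        | y :: ys, _ => simp [List.getLast?_cons_cons]
      by_cases hc : tail.getLast? = some ""
      · simp [hlast, hc, htne, List.dropLast_cons_of_ne_nil htne]
      · simp [hlast, hc, htne]

-- ===== VERDICT (by name: the statement is the Claim_ definition above) =====
theorem find_call_args_spec : Claim_equal_find_call_args := by
  intro content start_pos _ hpre
  unfold Spec_find_call_args find_call_args find_call_args_alt
  have hin : PySem.Str.pyGet? content start_pos ≠ none := by
    simp [PySem.Str.pyGet?, PySem.Chars.pyGet?_eq_listPyGet?, PySem.List.pyGet?_eq_none_iff]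
    exact hpre
  cases hg : PySem.Str.pyGet? content start_pos with
  | none => exact absurd hg hin
  | some c =>
    by_cases hc : c ≠ '('
    · simp [hc]
    · simp only [hc, if_false]
      have hrng : -(content.length : Int) ≤ start_pos ∧ start_pos < content.length := by
        have := hpre; simpa [Pre_find_call_args, PySem.Raise.InRange] using this
      rw [pvLoop_eq content (PySem.Str.len content - (start_pos + 1)).toNat 1 (start_pos + 1)
        [] (start_pos + 1) (by omega)
        (by simp [PySem.Str.len]; omega) (by omega) (le_refl _)]
      rw [pvAsm_eq]
      simp
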